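-- pv_equiv track=rewrite | github.com/jonusHK/algorithm_data_structure | dp/dp_28.py | solution
-- ===== SOURCE A (Python) =====
-- def solution(num):
--     dp = [(0, 0)] * (num + 1)
--     dp[0] = (1, 0)
--
--     if num == 0:
--         return dp[0]
--
--     dp[1] = (0, 1)
--
--     for i in range(2, num + 1):
--         dp[i] = (dp[i-2][0] + dp[i-1][0], dp[i-2][1] + dp[i-1][1])
--
--     return dp[num]
-- ===== SOURCE B (Python) =====
-- def solution(num):
--     # Fast doubling: fd(n) = (F(n), F(n+1)); zeros(n) = F(n+1) - F(n) = F(n-1), ones(n) = F(n)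
--     def fd(n):
--         if n == 0:
--             return (0, 1)
--         a, b = fd(n >> 1)
--         c = a * (2 * b - a)
--         d = a * a + b * b
--         if n & 1:
--             return (d, c + d)
--         return (c, d)
--     f, g = fd(num)
--     return (g - f, f)
-- ===== Notes on version B (the rewrite author's own statement) =====
-- stated objective: faster
-- what changed: Replaces A's O(n) bottom-up dp table of (zeros, ones) pairs by the O(log n) fast-doubling Fibonacci recursion, returning (F(n+1)-F(n), F(n)).
import Mathlib
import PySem

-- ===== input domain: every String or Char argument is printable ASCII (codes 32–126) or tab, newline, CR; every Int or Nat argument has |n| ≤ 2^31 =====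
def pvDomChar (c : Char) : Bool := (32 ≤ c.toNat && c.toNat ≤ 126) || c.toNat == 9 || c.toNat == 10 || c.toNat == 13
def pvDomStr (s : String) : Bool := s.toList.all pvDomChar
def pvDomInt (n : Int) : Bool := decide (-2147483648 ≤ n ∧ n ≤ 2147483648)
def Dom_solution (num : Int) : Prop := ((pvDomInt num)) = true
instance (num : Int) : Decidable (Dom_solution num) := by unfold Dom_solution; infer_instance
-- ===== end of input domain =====

-- B replaces A's O(n) dp-table loop by the O(log n) fast-doubling Fibonacci recursion (objective: faster).
-- A returns the tuple dp[num]; per the task's type convention the two components are delivered as a 2-element list.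

-- ===== PORT A =====
-- loop body: dp[i] = (dp[i-2][0] + dp[i-1][0], dp[i-2][1] + dp[i-1][1])
def solutionStep (dp : List (Int × Int)) (i : Int) : List (Int × Int) :=
  let a := PySem.List.pyGetD dp (i - 2) (0, 0)
  let b := PySem.List.pyGetD dp (i - 1) (0, 0)
  PySem.List.pySetD dp i (a.1 + b.1, a.2 + b.2)

def solution (num : Int) : List Int :=
  let dp := PySem.List.pyRepeat [((0 : Int), (0 : Int))] (num + 1)    -- [(0, 0)] * (num + 1)
  let dp := PySem.List.pySetD dp 0 (1, 0)                             -- dp[0] = (1, 0)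
  if num == 0 then
    let r := PySem.List.pyGetD dp 0 (0, 0)                            -- return dp[0]
    [r.1, r.2]
  else
    let dp := PySem.List.pySetD dp 1 (0, 1)                           -- dp[1] = (0, 1)
    let dp := (PySem.List.pyRange 2 (num + 1) 1).foldl solutionStep dp
    let r := PySem.List.pyGetD dp num (0, 0)                          -- return dp[num]
    [r.1, r.2]

-- ===== PORT B =====
-- fd(n) = (F(n), F(n+1)) by fast doubling; Source B's recursion on n >> 1 with the n & 1 test,
-- carried on Nat (Pre_ restricts to num ≥ 0; Source B does not terminate on negatives).
def solutionFd : Nat → Int × Int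
  | 0 => (0, 1)
  | (n + 1) =>
    let p := solutionFd ((n + 1) >>> 1)
    let a := p.1
    let b := p.2
    let c := a * (2 * b - a)
    let d := a * a + b * b
    if (n + 1) &&& 1 == 1 then (d, c + d) else (c, d)
decreasing_by
  simp only [Nat.shiftRight_one]
  omega

def solution_alt (num : Int) : List Int :=
  let p := solutionFd num.toNat
  [p.2 - p.1, p.1]

-- ===== PRECONDITION & SPEC =====
-- A raises IndexError for num < 0 (dp is then too short for dp[0] = …); B also raises there (RecursionError).
def Pre_solution (num : Int) : Prop := 0 ≤ num
instance (num : Int) : Decidable (Pre_solution num) := by unfold Pre_solution; infer_instance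
def pvWitness_solution : Int := 5

def Spec_solution (num : Int) (out : List Int) : Prop := out = solution_alt num
instance (num : Int) (out : List Int) : Decidable (Spec_solution num out) := by unfold Spec_solution; infer_instance

-- ===== CLAIM (what is proved, stated in full; the proofs are below) =====
def Claim_equal_solution : Prop := ∀ (num : Int), Dom_solution num → Pre_solution num → Spec_solution num (solution num)

-- ===== LEMMAS AND PROOFS =====

-- Fibonacci pair over Int, the value both programs compute.
def fibI (n : Nat) : Int := (Nat.fib n : Int)

lemma solutionFd_eq (n : Nat) : solutionFd n = (fibI n, fibI (n + 1)) := by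
  induction n using Nat.strong_induction_on with
  | _ n ih =>
    match n with
    | 0 => simp [solutionFd, fibI]
    | (m + 1) =>
      rw [solutionFd]
      have hlt : (m + 1) >>> 1 < m + 1 := by simp only [Nat.shiftRight_one]; omega
      rw [ih _ hlt]
      set k := (m + 1) >>> 1 with hk
      have hk2 : k = (m + 1) / 2 := by simp [hk, Nat.shiftRight_one]
      have hfib2 : fibI (2 * k) = fibI k * (2 * fibI (k + 1) - fibI k) := by
        have hle : Nat.fib k ≤ 2 * Nat.fib (k + 1) := by
          have := Nat.fib_le_fib_succ (n := k); omega
        simp only [fibI]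
        rw [Nat.fib_two_mul]
        push_cast [hle]
        ring
      have hfib21 : fibI (2 * k + 1) = fibI k * fibI k + fibI (k + 1) * fibI (k + 1) := by
        simp only [fibI]
        rw [Nat.fib_two_mul_add_one]
        push_cast
        ring
      rcases Nat.even_or_odd (m + 1) with he | ho
      · -- m + 1 = 2 * k
        have hmk : m + 1 = 2 * k := by rcases he with ⟨t, ht⟩; omega
        have hbit : (m + 1) &&& 1 = 0 := by
          have := Nat.and_one_is_mod (m + 1); omega
        simp only [hbit]
        norm_num
        rw [hmk, hfib2, hfib21]
        exact ⟨rfl, rfl⟩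
      · -- m + 1 = 2 * k + 1
        have hmk : m + 1 = 2 * k + 1 := by rcases ho with ⟨t, ht⟩; omega
        have hbit : (m + 1) &&& 1 = 1 := by
          have := Nat.and_one_is_mod (m + 1); omega
        simp only [hbit]
        norm_num
        rw [hmk, hfib21]
        constructor
        · rfl
        · have h22 : fibI (2 * k + 1 + 1) = fibI (k + 1) * (2 * fibI k + fibI (k + 1)) := by
            simp only [fibI]
            have : 2 * k + 1 + 1 = 2 * k + 2 := by ring
            rw [this, Nat.fib_two_mul_add_two]
            push_cast
            ring
          rw [h22]
          ring

lemma solution_alt_eq (n : Nat) :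
    solution_alt (n : Int) = [fibI (n + 1) - fibI n, fibI n] := by
  simp [solution_alt, solutionFd_eq]

-- A-side: the dp table after processing range(2, j+1), for 2 ≤ j ≤ n.
def dpInit (n : Nat) : List (Int × Int) :=
  ((List.replicate (n + 1) ((0 : Int), (0 : Int))).set 0 (1, 0)).set 1 (0, 1)

def dpAfter (n j : Nat) : List (Int × Int) :=
  (PySem.List.pyRange 2 ((j : Int) + 1) 1).foldl solutionStep (dpInit n)

lemma fibI_rec (j : Nat) (h : 1 ≤ j) : fibI (j + 1) = fibI (j - 1) + fibI j := by
  obtain ⟨m, rfl⟩ : ∃ m, j = m + 1 := ⟨j - 1, by omega⟩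
  simp only [fibI, Nat.add_sub_cancel]
  rw [show m + 1 + 1 = m + 2 from rfl, Nat.fib_add_two]
  push_cast; ring

lemma dpAfter_invariant (n : Nat) : ∀ j, 1 ≤ j → j ≤ n →
    (dpAfter n j).length = n + 1 ∧
    (dpAfter n j).getD (j - 1) (0, 0) = (fibI j - fibI (j - 1), fibI (j - 1)) ∧
    (dpAfter n j).getD j (0, 0) = (fibI (j + 1) - fibI j, fibI j) := by
  intro j h1
  induction j, h1 using Nat.le_induction with
  | base =>
    intro hn
    have hr : dpAfter n 1 = dpInit n := by
      simp [dpAfter, PySem.List.pyRange_one_eq_nil (le_refl (2 : Int))]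
    have hl0 : 1 < ((List.replicate (n + 1) ((0:Int),(0:Int))).set 0 (1,0)).length := by
      simp; omega
    refine ⟨by simp [hr, dpInit], ?_, ?_⟩
    · show (dpAfter n 1).getD 0 (0, 0) = _
      rw [hr]
      simp [dpInit, List.getD, fibI]
    · rw [hr]
      simp only [dpInit]
      rw [show ((((List.replicate (n + 1) ((0:Int),(0:Int))).set 0 (1,0)).set 1 (0,1)).getD 1 (0,0)) =
        (0, 1) by simp [List.getD, List.getElem?_set_self hl0]]
      simp [fibI]
  | succ j hj ih =>
    intro hn
    have ihj := ih (by omega)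
    obtain ⟨hlen, ha, hb⟩ := ihj
    have hstep : dpAfter n (j + 1) = solutionStep (dpAfter n j) ((j : Int) + 1) := by
      have hcast : ((j + 1 : Nat) : Int) + 1 = ((j : Int) + 1) + 1 := by push_cast; ring
      rw [dpAfter, hcast, PySem.List.pyRange_one_succ_right (by omega),
        List.foldl_append]
      rfl
    have hset : solutionStep (dpAfter n j) ((j : Int) + 1) =
        (dpAfter n j).set (j + 1)
          ((fibI j - fibI (j - 1)) + (fibI (j + 1) - fibI j), fibI (j - 1) + fibI j) := by
      simp only [solutionStep]
      have h2 : (j : Int) + 1 - 2 = ((j - 1 : Nat) : Int) := by omega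
      have h1' : (j : Int) + 1 - 1 = ((j : Nat) : Int) := by ring
      have hsc : (j : Int) + 1 = ((j + 1 : Nat) : Int) := by push_cast; ring
      rw [h2, h1', hsc, PySem.List.pyGetD_natCast, PySem.List.pyGetD_natCast,
        PySem.List.pySetD_natCast, ha, hb]
    have hlt : j + 1 < (dpAfter n j).length := by omega
    refine ⟨?_, ?_, ?_⟩
    · rw [hstep, hset]; simp [hlen]
    · rw [hstep, hset]
      have : (j + 1) - 1 = j := by omega
      rw [this]
      rw [show ((dpAfter n j).set (j+1) _).getD j (0,0) = (dpAfter n j).getD j (0,0) by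
        simp [List.getD, List.getElem?_set_ne (show j + 1 ≠ j by omega)]]
      exact hb
    · rw [hstep, hset]
      rw [show ∀ v, ((dpAfter n j).set (j+1) v).getD (j+1) (0,0) = v from fun v => by
        simp [List.getD, List.getElem?_set_self hlt]]
      have hrec := fibI_rec j hj
      have hrec2 := fibI_rec (j + 1) (by omega)
      simp only [Nat.add_sub_cancel] at hrec2
      rw [Prod.mk.injEq]
      exact ⟨by omega, by omega⟩

lemma solution_eq (n : Nat) : solution (n : Int) = [fibI (n + 1) - fibI n, fibI n] := by
  match n with
  | 0 => decide
  | 1 => decide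
  | (m + 2) =>
    set n := m + 2 with hn
    have hne : (((n : Nat) : Int) == 0) = false := by
      simp only [beq_eq_false_iff_ne, ne_eq]
      omega
    have hrep : PySem.List.pyRepeat [((0 : Int), (0 : Int))] ((n : Int) + 1) =
        List.replicate (n + 1) ((0 : Int), (0 : Int)) := by
      rw [PySem.List.pyRepeat_singleton]
      congr 1
    have hset0 : ∀ (xs : List (Int × Int)) (v : Int × Int),
        PySem.List.pySetD xs (0 : Int) v = xs.set 0 v := by
      intro xs v; rw [PySem.List.pySetD_of_nonneg xs v (by norm_num)]; rfl
    have hset1 : ∀ (xs : List (Int × Int)) (v : Int × Int),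
        PySem.List.pySetD xs (1 : Int) v = xs.set 1 v := by
      intro xs v; rw [PySem.List.pySetD_of_nonneg xs v (by norm_num)]; rfl
    have hinv := dpAfter_invariant n n (by omega) (le_refl n)
    simp only [solution, hne, if_false, hrep, hset0, hset1, Bool.false_eq_true]
    rw [show ((List.replicate (n + 1) ((0:Int),(0:Int))).set 0 (1,0)).set 1 (0,1) = dpInit n from rfl]
    rw [show (PySem.List.pyRange 2 ((n : Int) + 1) 1).foldl solutionStep (dpInit n) = dpAfter n n from rfl]
    rw [PySem.List.pyGetD_natCast]
    rw [hinv.2.2]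

-- ===== VERDICT (by name: the statement is the Claim_ definition above) =====
theorem solution_spec : Claim_equal_solution := by
  intro num _ hpre
  unfold Spec_solution
  obtain ⟨n, rfl⟩ : ∃ n : Nat, num = (n : Int) := ⟨num.toNat, (Int.toNat_of_nonneg hpre).symm⟩
  rw [solution_eq, solution_alt_eq]
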